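-- pv_equiv track=rewrite | github.com/arcuru/MyBin | daily_programmer/255/intermediate.py | ambiguous_base
-- ===== SOURCE A (Python) =====
-- def ambiguous_base(n, base):
--     ans = []
--     def helper(total, rem, exp):
--         if rem == 0:
--             ans.append(total)
--             return
--         cut = 10
--         while rem%cut < base and cut//10 <= rem:
--             # Removing leading 0 issue
--             if cut>10 and rem%cut == rem%(cut//10):
--                 cut *= 10
--                 continue
--             helper(total + (rem%cut)*(base**exp), rem//cut, exp+1)
--             cut *= 10
--             continue
--
--     helper(0, n, 0)
--     return sorted(ans)
-- ===== SOURCE B (Python) =====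
-- def ambiguous_base(n, base):
--     # Bottom-up table over the suffix quotients n//10**i instead of A's
--     # exponential backtracking recursion: each suffix's interpretation list is
--     # computed once and shared, chunks combine by Horner (u + base*w).
--     if n < 0:
--         return []
--     q = [n]                       # q[i] = n // 10**i; ends with 0
--     while q[-1] > 0:
--         q.append(q[-1] // 10)
--
--     def tables(qs):
--         # qs = a nonempty tail of q; returns the list of interpretation lists
--         # of qs[0], qs[1], ... (tables(qs)[k] interprets qs[k])
--         if len(qs) == 1:          # qs == [0]: one interpretation, value 0
--             return [[0]]
--         ts = tables(qs[1:])
--         vals = []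
--         j = 1
--         for qj, ws in zip(qs[1:], ts):
--             u = qs[0] - qj * 10 ** j          # low j-digit chunk of qs[0]
--             if (j == 1 or u >= 10 ** (j - 1)) and u < base:
--                 vals.extend(u + base * w for w in ws)
--             j += 1
--         return [vals] + ts
--
--     return sorted(tables(q)[0])
-- ===== Notes on version B (the rewrite author's own statement) =====
-- stated objective: alternative
-- what changed: A's exponential backtracking recursion (peeling low-end chunks with rem%cut, carrying total and a base**exp scale, appending into a shared list) is replaced by a bottom-up dynamic-programming pass over the suffix quotients n//10**i: each suffix's interpretation list is computed once, shared between all splits that reach it, and chunks are combined low-to-high by Horner (u + base*w).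
import Mathlib
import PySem

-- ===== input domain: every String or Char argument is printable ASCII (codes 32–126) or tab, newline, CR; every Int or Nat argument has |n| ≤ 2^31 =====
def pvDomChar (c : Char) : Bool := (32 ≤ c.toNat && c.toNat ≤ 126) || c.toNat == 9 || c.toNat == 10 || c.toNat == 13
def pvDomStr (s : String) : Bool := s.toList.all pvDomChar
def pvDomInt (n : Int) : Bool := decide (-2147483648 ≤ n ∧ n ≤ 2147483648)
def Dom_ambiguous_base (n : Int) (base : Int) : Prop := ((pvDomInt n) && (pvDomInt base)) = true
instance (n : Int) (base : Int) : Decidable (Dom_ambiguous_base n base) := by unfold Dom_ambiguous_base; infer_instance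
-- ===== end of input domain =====

-- B replaces A's backtracking recursion (which re-enumerates every suffix once per
-- path reaching it, carrying a base**exp scale) by a bottom-up table over the suffix
-- quotients n//10**i, computing each suffix's interpretation list once and combining
-- chunks low-to-high by Horner (u + base*w); objective: alternative algorithm.

-- ===== PORT A =====
-- `exp` is ported as Nat: in A it starts at 0 and is only ever incremented.
-- The extra `10 ≤ cut` conjunct in the loop guard is a totality guard only:
-- every call A's Python makes has cut ∈ {10, 100, 1000, …}, where it is true.
mutual
def ambHelperA (base total rem : Int) (exp : Nat) (ans : List Int) : List Int :=
  if rem = 0 then ans ++ [total]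
  else ambLoopA base total rem exp 10 ans
termination_by (rem.toNat, (10 * rem + 10).toNat + 1)
decreasing_by
  apply Prod.Lex.right; omega

def ambLoopA (base total rem : Int) (exp : Nat) (cut : Int) (ans : List Int) : List Int :=
  if h : 10 ≤ cut ∧ PySem.Int.mod rem cut < base ∧ PySem.Int.floordiv cut 10 ≤ rem then
    if 10 < cut ∧ PySem.Int.mod rem cut = PySem.Int.mod rem (PySem.Int.floordiv cut 10) then
      ambLoopA base total rem exp (cut * 10) ans
    else
      ambLoopA base total rem exp (cut * 10)
        (ambHelperA base (total + PySem.Int.mod rem cut * base ^ exp)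
          (PySem.Int.floordiv rem cut) (exp + 1) ans)
  else ans
termination_by (rem.toNat, (10 * rem + 10 - cut).toNat)
decreasing_by
  · apply Prod.Lex.right
    have h1 : PySem.Int.floordiv cut 10 = cut / 10 := PySem.Int.floordiv_eq_ediv_of_pos (by omega)
    rw [h1] at h
    omega
  · apply Prod.Lex.left
    have h1 : PySem.Int.floordiv cut 10 = cut / 10 := PySem.Int.floordiv_eq_ediv_of_pos (by omega)
    rw [h1] at h
    have hrem1 : 1 ≤ rem := by omega
    have hlt : PySem.Int.floordiv rem cut < rem := by
      rw [PySem.Int.floordiv_lt_iff_lt_mul (by omega : (0:Int) < cut)]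
      nlinarith
    have hge : (0:Int) ≤ PySem.Int.floordiv rem cut := by
      rw [PySem.Int.le_floordiv_iff_mul_le (by omega : (0:Int) < cut)]
      omega
    omega
  · apply Prod.Lex.right
    have h1 : PySem.Int.floordiv cut 10 = cut / 10 := PySem.Int.floordiv_eq_ediv_of_pos (by omega)
    rw [h1] at h
    omega
end

def ambiguous_base (n : Int) (base : Int) : List Int :=
  PySem.List.sorted (ambHelperA base 0 n 0 []) (fun x : Int => x) false

-- ===== PORT B =====
-- q = [m, m//10, m//100, …, 0]  (the while loop of Source B appending q[-1]//10)
def qListB (m : Int) : List Int :=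
  m :: (if h : 0 < m then qListB (PySem.Int.floordiv m 10) else [])
termination_by m.toNat
decreasing_by
  have h2 : PySem.Int.floordiv m 10 = m / 10 := PySem.Int.floordiv_eq_ediv_of_pos (by omega)
  rw [h2]
  omega

-- the `for (qj, ws) in zip(qs[1:], ts)` loop of Source B, with its counter j
def valsB (base r : Int) (j : Nat) : List Int → List (List Int) → List Int
  | qj :: qs', ws :: ts' =>
      let u := r - qj * 10 ^ j
      (if (j = 1 ∨ 10 ^ (j - 1) ≤ u) ∧ u < base then ws.map (fun w => u + base * w) else [])
        ++ valsB base r (j + 1) qs' ts'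
  | _, _ => []

-- tables(qs) of Source B (structural recursion on the nonempty tail list)
def tablesB (base : Int) : List Int → List (List Int)
  | [] => []          -- unreachable: qs is always a nonempty tail of q
  | [_] => [[0]]
  | r :: rest =>
      let ts := tablesB base rest
      valsB base r 1 rest ts :: ts

def ambiguous_base_alt (n : Int) (base : Int) : List Int :=
  if n < 0 then []
  else PySem.List.sorted ((tablesB base (qListB n)).headD []) (fun x : Int => x) false

-- ===== PRECONDITION & SPEC =====
def Spec_ambiguous_base (n : Int) (base : Int) (out : List Int) : Prop := out = ambiguous_base_alt n base
instance (n : Int) (base : Int) (out : List Int) : Decidable (Spec_ambiguous_base n base out) := by unfold Spec_ambiguous_base; infer_instance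

-- ===== CLAIM (what is proved, stated in full; the proofs are below) =====
def Claim_equal_ambiguous_base : Prop := ∀ (n : Int) (base : Int), Dom_ambiguous_base n base → Spec_ambiguous_base n base (ambiguous_base n base)

-- ===== LEMMAS AND PROOFS =====

lemma helperA_neg (base total rem : Int) (exp : Nat) (ans : List Int) (h : rem < 0) :
    ambHelperA base total rem exp ans = ans := by
  rw [ambHelperA]
  rw [if_neg (by omega)]
  rw [ambLoopA]
  rw [dif_neg]
  rintro ⟨_, _, h3⟩
  have : PySem.Int.floordiv 10 10 = (10 : Int) / 10 := PySem.Int.floordiv_eq_ediv_of_pos (by omega)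
  rw [this] at h3
  omega

-- ---- proof-side helpers ----

-- V base m = interpretation list of quotient m (head of Source B's tables)
def Vt (base m : Int) : List Int := (tablesB base (qListB m)).headD []

lemma pvP_pos (j : Nat) : (0:Int) < 10 ^ j := pow_pos (by norm_num) j

-- decimal-step decomposition of emod
lemma pvDecomp (rem P : Int) (hP : 0 < P) :
    rem % (P * 10) = rem % P + P * ((rem / P) % 10) := by
  have e1 : rem % P + P * (rem / P) = rem := Int.emod_add_ediv rem P
  have e2 : (rem / P) % 10 + 10 * ((rem / P) / 10) = rem / P := Int.emod_add_ediv (rem / P) 10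
  have h1 : rem % P + P * ((rem / P) % 10) + (P * 10) * ((rem / P) / 10) = rem := by
    linear_combination e1 + P * e2
  have hb1 : 0 ≤ rem % P := Int.emod_nonneg _ hP.ne'
  have hb2 : rem % P < P := Int.emod_lt_of_pos _ hP
  have hd1 : 0 ≤ (rem / P) % 10 := Int.emod_nonneg _ (by norm_num)
  have hd2 : (rem / P) % 10 < 10 := Int.emod_lt_of_pos _ (by norm_num)
  have h2 : 0 ≤ rem % P + P * ((rem / P) % 10) := by positivity
  have h3 : rem % P + P * ((rem / P) % 10) < P * 10 := by nlinarith
  exact ((Int.ediv_emod_unique (by positivity)).mpr ⟨h1, h2, h3⟩).2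

lemma pvDivDiv (rem P : Int) (hP : 0 ≤ P) : rem / P / 10 = rem / (P * 10) :=
  Int.ediv_ediv_of_nonneg hP

lemma qListB_pos (m : Int) (hm : 0 < m) : qListB m = m :: qListB (m / 10) := by
  rw [qListB, dif_pos hm, PySem.Int.floordiv_eq_ediv_of_pos (by norm_num)]

lemma qListB_nonpos (m : Int) (hm : ¬ 0 < m) : qListB m = [m] := by
  rw [qListB, dif_neg hm]

lemma Vt_zero (base : Int) : Vt base 0 = [0] := by
  unfold Vt
  rw [qListB_nonpos 0 (by omega)]
  rfl

lemma qListB_ne_nil (m : Int) : qListB m ≠ [] := by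
  rw [qListB]; simp

lemma tablesB_pair (base r x : Int) (l : List Int) :
    tablesB base (r :: x :: l)
      = valsB base r 1 (x :: l) (tablesB base (x :: l)) :: tablesB base (x :: l) := rfl

lemma tablesB_cons (base m : Int) :
    tablesB base (qListB m)
      = Vt base m :: (if 0 < m then tablesB base (qListB (m / 10)) else []) := by
  by_cases hm : 0 < m
  · cases hq : qListB (m / 10) with
    | nil => exact absurd hq (qListB_ne_nil _)
    | cons x l =>
      rw [if_pos hm, qListB_pos m hm]
      unfold Vt
      rw [qListB_pos m hm, hq, tablesB_pair]
      rfl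
  · rw [if_neg hm, qListB_nonpos m hm]
    unfold Vt
    rw [qListB_nonpos m hm]
    rfl

lemma Vt_pos (base m : Int) (hm : 0 < m) :
    Vt base m = valsB base m 1 (qListB (m / 10)) (tablesB base (qListB (m / 10))) := by
  cases hq : qListB (m / 10) with
  | nil => exact absurd hq (qListB_ne_nil _)
  | cons x l =>
    unfold Vt
    rw [qListB_pos m hm, hq, tablesB_pair]
    rfl

-- after a chunk of value ≥ base, every longer low chunk also has value ≥ base
lemma valsB_nil (base rem : Int) (hrem : 0 ≤ rem) :
    ∀ (t j : Nat) (m : Int), m.toNat ≤ t → 1 ≤ j → m = rem / 10 ^ j →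
      base ≤ rem % 10 ^ j →
      ∀ ts, valsB base rem j (qListB m) ts = [] := by
  intro t
  induction t with
  | zero =>
    intro j m ht hj hm hbase ts
    have hm0 : 0 ≤ m := hm ▸ Int.ediv_nonneg hrem (pvP_pos j).le
    have hmz : m = 0 := by omega
    subst hmz
    rw [qListB_nonpos 0 (by omega)]
    cases ts with
    | nil => rfl
    | cons ws ts' =>
      rw [valsB]
      have hu : rem - 0 * 10 ^ j = rem % 10 ^ j := by
        rw [Int.emod_def, ← hm]; ring
      rw [hu, if_neg (by intro ⟨_, hlt⟩; omega)]
      rfl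
  | succ t ih =>
    intro j m ht hj hm hbase ts
    have hm0 : 0 ≤ m := hm ▸ Int.ediv_nonneg hrem (pvP_pos j).le
    cases ts with
    | nil =>
      rw [qListB]
      rfl
    | cons ws ts' =>
      by_cases hmp : 0 < m
      · rw [qListB_pos m hmp, valsB]
        have hu : rem - m * 10 ^ j = rem % 10 ^ j := by
          rw [Int.emod_def, hm]; ring
        rw [hu, if_neg (by intro ⟨_, hlt⟩; omega)]
        have hdd : m / 10 = rem / 10 ^ (j + 1) := by
          rw [hm, pvDivDiv rem _ (pvP_pos j).le, pow_succ]
        have hmono : base ≤ rem % 10 ^ (j + 1) := by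
          have := pvDecomp rem (10 ^ j) (pvP_pos j)
          have hd1 : 0 ≤ (rem / 10 ^ j) % 10 := Int.emod_nonneg _ (by norm_num)
          have hP := pvP_pos j
          rw [← pow_succ] at this
          nlinarith
        have hlt10 : (m / 10).toNat ≤ t := by omega
        have := ih (j + 1) (m / 10) hlt10 (by omega) hdd hmono ts'
        simp [this]
      · rw [qListB_nonpos m hmp, valsB]
        have hmz : m = 0 := by omega
        subst hmz
        have hu : rem - 0 * 10 ^ j = rem % 10 ^ j := by
          rw [Int.emod_def, ← hm]; ring
        rw [hu, if_neg (by intro ⟨_, hlt⟩; omega)]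
        rfl

-- once rem < 10^(j-1) (and j ≥ 2) the zip yields nothing
lemma valsB_small (base rem : Int) (j : Nat) (hj : 2 ≤ j) (hrem : 0 ≤ rem)
    (hlt : rem < 10 ^ (j - 1)) :
    ∀ ts, valsB base rem j (qListB 0) ts = [] := by
  intro ts
  rw [qListB_nonpos 0 (by omega)]
  cases ts with
  | nil => rfl
  | cons ws ts' =>
    rw [valsB]
    rw [if_neg (by rintro ⟨hd, _⟩; rcases hd with hd | hd; omega; omega)]
    rfl

-- one zip step of Source B's inner loop, on quotient lists
lemma valsB_step (base rem : Int) (j : Nat) (m : Int) :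
    valsB base rem j (qListB m) (tablesB base (qListB m))
      = (if (j = 1 ∨ 10 ^ (j - 1) ≤ rem - m * 10 ^ j) ∧ rem - m * 10 ^ j < base
           then (Vt base m).map (fun w => (rem - m * 10 ^ j) + base * w) else [])
          ++ (if 0 < m then
                valsB base rem (j + 1) (qListB (m / 10)) (tablesB base (qListB (m / 10)))
              else []) := by
  by_cases hm : 0 < m
  · rw [tablesB_cons, if_pos hm, qListB_pos m hm, valsB, if_pos hm]
  · rw [tablesB_cons, if_neg hm, qListB_nonpos m hm, valsB, if_neg hm]
    rfl

-- loop exit when rem has fewer than j digits (rem / 10^(j-1) = 0)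
lemma loopA_stop (base rem : Int) (hrem : 0 < rem) (j : Nat) (hj : 1 ≤ j)
    (hp : rem / 10 ^ (j - 1) = 0) (total : Int) (exp : Nat) (ans : List Int) :
    ambLoopA base total rem exp (10 ^ j) ans
      = ans ++ (valsB base rem j (qListB (rem / 10 ^ j))
          (tablesB base (qListB (rem / 10 ^ j)))).map (fun w => total + base ^ exp * w) := by
  have hP := pvP_pos (j - 1)
  have hPj := pvP_pos j
  have hcut : (10:Int) ^ j = 10 ^ (j - 1) * 10 := by
    rw [← pow_succ]
    congr 1
    omega
  have hsmall : rem < 10 ^ (j - 1) := by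
    have heq := Int.emod_add_ediv rem (10 ^ (j - 1))
    rw [hp, mul_zero] at heq
    have := Int.emod_lt_of_pos rem hP
    omega
  have hj2 : 2 ≤ j := by
    by_contra h
    have hj1 : j = 1 := by omega
    rw [hj1] at hsmall
    norm_num at hsmall
    omega
  have hfd : PySem.Int.floordiv (10 ^ j) 10 = 10 ^ (j - 1) := by
    rw [PySem.Int.floordiv_eq_ediv_of_pos (by norm_num), hcut,
      Int.mul_ediv_cancel _ (by norm_num)]
  rw [ambLoopA, dif_neg (by rw [hfd]; rintro ⟨_, _, h3⟩; omega)]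
  have hmz : rem / 10 ^ j = 0 := by
    rw [show rem / 10 ^ j = rem / 10 ^ (j - 1) / 10 by
      rw [pvDivDiv rem _ hP.le, ← hcut], hp]
    norm_num
  rw [hmz, valsB_small base rem j hj2 hrem.le hsmall]
  simp

lemma loopA (base rem : Int) (hrem : 0 < rem)
    (IH : ∀ rem' : Int, 0 ≤ rem' → rem' < rem → ∀ (total : Int) (exp : Nat) (ans : List Int),
        ambHelperA base total rem' exp ans
          = ans ++ (Vt base rem').map (fun w => total + base ^ exp * w)) :
    ∀ (t j : Nat), 1 ≤ j → (rem / 10 ^ (j - 1)).toNat ≤ t →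
    ∀ (total : Int) (exp : Nat) (ans : List Int),
    ambLoopA base total rem exp (10 ^ j) ans
      = ans ++ (valsB base rem j (qListB (rem / 10 ^ j))
          (tablesB base (qListB (rem / 10 ^ j)))).map (fun w => total + base ^ exp * w) := by
  intro t
  induction t with
  | zero =>
    intro j hj ht total exp ans
    -- fuel 0 forces rem / 10^(j-1) = 0, i.e. the loop guard fails at once
    have hP := pvP_pos (j - 1)
    have hp0 : rem / 10 ^ (j - 1) = 0 := by
      have := Int.ediv_nonneg hrem.le hP.le
      omega
    exact loopA_stop base rem hrem j hj hp0 total exp ans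
  | succ t ih =>
    intro j hj ht total exp ans
    have hP := pvP_pos (j - 1)
    have hPj := pvP_pos j
    have hcut : (10:Int) ^ j = 10 ^ (j - 1) * 10 := by
      rw [← pow_succ]
      congr 1
      omega
    by_cases hp0 : rem / 10 ^ (j - 1) ≤ 0
    · have hp : rem / 10 ^ (j - 1) = 0 := by
        have := Int.ediv_nonneg hrem.le hP.le
        omega
      exact loopA_stop base rem hrem j hj hp total exp ans
    · -- the loop guard's  cut//10 ≤ rem  part holds
      have hp1 : 1 ≤ rem / 10 ^ (j - 1) := by omega
      have hPle : 10 ^ (j - 1) ≤ rem := by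
        have heq := Int.emod_add_ediv rem (10 ^ (j - 1))
        have hr0 : 0 ≤ rem % 10 ^ (j - 1) := Int.emod_nonneg _ hP.ne'
        nlinarith [mul_le_mul_of_nonneg_left hp1 hP.le]
      have hguard1 : (10:Int) ≤ 10 ^ j := by nlinarith
      have hfd : PySem.Int.floordiv (10 ^ j) 10 = 10 ^ (j - 1) := by
        rw [PySem.Int.floordiv_eq_ediv_of_pos (by norm_num), hcut,
          Int.mul_ediv_cancel _ (by norm_num)]
      have hmod : PySem.Int.mod rem (10 ^ j) = rem % 10 ^ j :=
        PySem.Int.mod_eq_emod_of_pos hPj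
      have hmodP : PySem.Int.mod rem (10 ^ (j - 1)) = rem % 10 ^ (j - 1) :=
        PySem.Int.mod_eq_emod_of_pos hP
      have hfr : PySem.Int.floordiv rem (10 ^ j) = rem / 10 ^ j :=
        PySem.Int.floordiv_eq_ediv_of_pos hPj
      have hU : rem % 10 ^ j = rem % 10 ^ (j - 1) + 10 ^ (j - 1) * ((rem / 10 ^ (j - 1)) % 10) := by
        rw [hcut, pvDecomp rem _ hP]
      have hdd : rem / 10 ^ (j - 1) / 10 = rem / 10 ^ j := by
        rw [pvDivDiv rem _ hP.le, ← hcut]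
      have hr0 : 0 ≤ rem % 10 ^ (j - 1) := Int.emod_nonneg _ hP.ne'
      have hrP : rem % 10 ^ (j - 1) < 10 ^ (j - 1) := Int.emod_lt_of_pos _ hP
      have hd0 : 0 ≤ (rem / 10 ^ (j - 1)) % 10 := Int.emod_nonneg _ (by norm_num)
      have hd9 : (rem / 10 ^ (j - 1)) % 10 < 10 := Int.emod_lt_of_pos _ (by norm_num)
      have hm0 : 0 ≤ rem / 10 ^ j := Int.ediv_nonneg hrem.le hPj.le
      have hmfuel : (rem / 10 ^ j).toNat ≤ t := by omega
      by_cases hub : base ≤ rem % 10 ^ j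
      · -- chunk value ≥ base: A's while stops, B filters everything that is left
        rw [ambLoopA, dif_neg (by rw [hmod]; rintro ⟨_, h2, _⟩; omega)]
        rw [valsB_nil base rem hrem.le (rem / 10 ^ j).toNat j (rem / 10 ^ j) le_rfl hj rfl hub]
        simp
      · have hult : rem % 10 ^ j < base := by omega
        rw [ambLoopA, dif_pos ⟨hguard1, by rw [hmod]; exact hult, by rw [hfd]; exact hPle⟩]
        have h2j : ((10:Int) < 10 ^ j) ↔ 2 ≤ j := by
          constructor
          · intro hlt
            by_contra hle
            have hj1 : j = 1 := by omega
            rw [hj1] at hlt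
            norm_num at hlt
          · intro h2
            calc (10:Int) < 100 := by norm_num
              _ = 10 ^ 2 := by norm_num
              _ ≤ 10 ^ j := pow_le_pow_right₀ (by norm_num) h2
        have hskip_iff : ((10:Int) < 10 ^ j ∧ PySem.Int.mod rem (10 ^ j)
              = PySem.Int.mod rem (PySem.Int.floordiv (10 ^ j) 10))
            ↔ (2 ≤ j ∧ (rem / 10 ^ (j - 1)) % 10 = 0) := by
          rw [hfd, hmod, hmodP, h2j, hU]
          constructor
          · rintro ⟨ha, hb⟩
            refine ⟨ha, ?_⟩
            have : 10 ^ (j - 1) * ((rem / 10 ^ (j - 1)) % 10) = 0 := by omega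
            rcases mul_eq_zero.mp this with h | h
            · omega
            · exact h
          · rintro ⟨ha, hb⟩
            rw [hb]
            exact ⟨ha, by ring⟩
        have hcut10 : (10:Int) ^ j * 10 = 10 ^ (j + 1) := (pow_succ 10 j).symm
        rw [valsB_step]
        simp only [hskip_iff]
        by_cases hskip : 2 ≤ j ∧ (rem / 10 ^ (j - 1)) % 10 = 0
        · -- A skips this cut (leading-zero chunk); B's filter rejects it too
          rw [if_pos hskip]
          rw [hcut10, ih (j + 1) (by omega) (by simpa using hmfuel) total exp ans]
          have hbranch : ¬ ((j = 1 ∨ 10 ^ (j - 1) ≤ rem - rem / 10 ^ j * 10 ^ j)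
              ∧ rem - rem / 10 ^ j * 10 ^ j < base) := by
            have hue : rem - rem / 10 ^ j * 10 ^ j = rem % 10 ^ j := by
              rw [Int.emod_def]; ring
            rw [hue]
            rintro ⟨hd, _⟩
            rcases hd with hd | hd
            · omega
            · rw [hU, hskip.2] at hd
              omega
          rw [if_neg hbranch]
          by_cases hmz : 0 < rem / 10 ^ j
          · rw [if_pos hmz]
            rw [show rem / 10 ^ j / 10 = rem / 10 ^ (j + 1) by
              rw [pvDivDiv rem _ hPj.le, ← pow_succ]]
            simp
          · have hz : rem / 10 ^ j = 0 := by omega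
            rw [if_neg hmz]
            have hjz : rem / 10 ^ (j + 1) = 0 := by
              rw [show rem / 10 ^ (j+1) = rem / 10 ^ j / 10 by
                rw [pvDivDiv rem _ hPj.le, ← pow_succ], hz]
              norm_num
            have hsmall : rem < 10 ^ j := by
              have heq := Int.emod_add_ediv rem (10 ^ j)
              have := Int.emod_lt_of_pos rem hPj
              have := Int.emod_nonneg rem hPj.ne'
              rw [hz] at heq
              omega
            rw [hjz, valsB_small base rem (j + 1) (by omega) hrem.le (by simpa using hsmall)]
            simp
        · -- A recurses on this chunk; B's filter keeps it
          rw [if_neg hskip]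
          have hd1 : ¬ (2 ≤ j) ∨ 1 ≤ (rem / 10 ^ (j - 1)) % 10 := by
            by_cases h2 : 2 ≤ j
            · right
              rcases Decidable.lt_or_eq_of_le hd0 with h | h
              · omega
              · exact absurd ⟨h2, h.symm⟩ hskip
            · left; exact h2
          have hue : rem - rem / 10 ^ j * 10 ^ j = rem % 10 ^ j := by
            rw [Int.emod_def]; ring
          have hbranch : ((j = 1 ∨ 10 ^ (j - 1) ≤ rem - rem / 10 ^ j * 10 ^ j)
              ∧ rem - rem / 10 ^ j * 10 ^ j < base) := by
            rw [hue]
            refine ⟨?_, hult⟩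
            rcases hd1 with h | h
            · left; omega
            · right
              rw [hU]
              nlinarith [mul_le_mul_of_nonneg_left h hP.le]
          have hmlt : rem / 10 ^ j < rem := by
            have hple : rem / 10 ^ (j - 1) ≤ rem := by
              have heq := Int.emod_add_ediv rem (10 ^ (j - 1))
              nlinarith [mul_le_mul_of_nonneg_right (by omega : (1:Int) ≤ 10 ^ (j - 1))
                (by omega : (0:Int) ≤ rem / 10 ^ (j - 1))]
            omega
          rw [hmod, hfr, IH (rem / 10 ^ j) hm0 hmlt]
          rw [hcut10, ih (j + 1) (by omega) (by simpa using hmfuel)]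
          rw [if_pos hbranch, hue]
          by_cases hmz : 0 < rem / 10 ^ j
          · rw [if_pos hmz]
            rw [show rem / 10 ^ j / 10 = rem / 10 ^ (j + 1) by
              rw [pvDivDiv rem _ hPj.le, ← pow_succ]]
            rw [List.map_append, List.map_map, ← List.append_assoc]
            congr 1
            congr 1
            apply List.map_congr_left
            intro w _
            simp only [Function.comp]
            rw [pow_succ]
            ring
          · have hz : rem / 10 ^ j = 0 := by omega
            rw [if_neg hmz]
            have hjz : rem / 10 ^ (j + 1) = 0 := by
              rw [show rem / 10 ^ (j+1) = rem / 10 ^ j / 10 by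
                rw [pvDivDiv rem _ hPj.le, ← pow_succ], hz]
              norm_num
            have hsmall : rem < 10 ^ j := by
              have heq := Int.emod_add_ediv rem (10 ^ j)
              have := Int.emod_lt_of_pos rem hPj
              have := Int.emod_nonneg rem hPj.ne'
              rw [hz] at heq
              omega
            rw [hjz, valsB_small base rem (j + 1) (by omega) hrem.le (by simpa using hsmall)]
            simp only [List.map_nil, List.append_nil, List.map_map]
            congr 1
            apply List.map_congr_left
            intro w _
            simp only [Function.comp_apply]
            rw [pow_succ]
            ring

lemma mainA (base : Int) : ∀ (k : Nat) (rem : Int), rem.toNat ≤ k → 0 ≤ rem →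
    ∀ (total : Int) (exp : Nat) (ans : List Int),
    ambHelperA base total rem exp ans
      = ans ++ (Vt base rem).map (fun w => total + base ^ exp * w) := by
  intro k
  induction k with
  | zero =>
    intro rem hk h0 total exp ans
    have hz : rem = 0 := by omega
    subst hz
    rw [ambHelperA, if_pos rfl, Vt_zero]
    simp
  | succ k ih =>
    intro rem hk h0 total exp ans
    by_cases hz : rem = 0
    · subst hz
      rw [ambHelperA, if_pos rfl, Vt_zero]
      simp
    · have hpos : 0 < rem := by omega
      rw [ambHelperA, if_neg hz]
      have IH' : ∀ rem' : Int, 0 ≤ rem' → rem' < rem →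
          ∀ (total : Int) (exp : Nat) (ans : List Int),
          ambHelperA base total rem' exp ans
            = ans ++ (Vt base rem').map (fun w => total + base ^ exp * w) := by
        intro rem' h1 h2
        exact ih rem' (by omega) h1
      have hloop := loopA base rem hpos IH' rem.toNat 1 (by norm_num)
        (by simp)
        total exp ans
      simp only [pow_one] at hloop
      rw [hloop, Vt_pos base rem hpos]

theorem ambiguous_base_spec : Claim_equal_ambiguous_base := by
  intro n base _
  unfold Spec_ambiguous_base ambiguous_base ambiguous_base_alt
  by_cases hn : n < 0
  · rw [if_pos hn, helperA_neg base 0 n 0 [] hn]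
    rfl
  · rw [if_neg hn]
    rw [mainA base n.toNat n (le_refl _) (by omega)]
    simp [Vt]
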